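-- pv_equiv track=rewrite | github.com/thidorta/desafios_programacao | placar5/meet_middle.py | divide_subset
-- ===== SOURCE A (Python) =====
-- from itertools import combinations, chain
--
-- def retorna_conjuntos(lista):
--     return chain.from_iterable(combinations(lista,r) for r in range(len(lista)+1))
--
-- def divide_subset(n, arr, target):
--     size = len(arr)
--     mid = size // 2
--     div1 = arr[:mid]
--     div2 = arr[mid:]
--
--     div1_conjunto = retorna_conjuntos(div1)
--     div2_conjunto = retorna_conjuntos(div2)
--
--     mapa_somas = dict()
--
--     total = 0
--
--     for conjunto in div1_conjunto:
--         soma = 0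
--         for numero in conjunto:
--             soma += numero
--         if soma not in mapa_somas:
--             mapa_somas[soma] = 1
--         else:
--             mapa_somas[soma] += 1
--
--     for conjunto in div2_conjunto:
--         soma = 0
--         for numero in conjunto:
--             soma += numero
--         complemento = target-soma
--         if complemento in mapa_somas:
--             total += mapa_somas[complemento]
--
--     return total
-- ===== SOURCE B (Python) =====
-- def divide_subset(n, arr, target):
--     mid = len(arr) // 2
--     left, right = arr[:mid], arr[mid:]
--
--     def subset_sums(lst):
--         sums = [0]
--         for x in lst:
--             sums += [s + x for s in sums]
--         return sums
--
--     counts = {}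
--     for s in subset_sums(left):
--         counts[s] = counts.get(s, 0) + 1
--
--     return sum(counts.get(target - s, 0) for s in subset_sums(right))
-- ===== Notes on version B (the rewrite author's own statement) =====
-- stated objective: alternative
-- what changed: B builds each half's multiset of subset sums incrementally by doubling (sums += [s+x for s in sums]) instead of enumerating itertools.combinations and re-summing every subset from scratch, then counts matches through a dict of left-half sums; intended to cut the per-subset re-summing, measured only ~1.5x at the sizes both finish.
import Mathlib
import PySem

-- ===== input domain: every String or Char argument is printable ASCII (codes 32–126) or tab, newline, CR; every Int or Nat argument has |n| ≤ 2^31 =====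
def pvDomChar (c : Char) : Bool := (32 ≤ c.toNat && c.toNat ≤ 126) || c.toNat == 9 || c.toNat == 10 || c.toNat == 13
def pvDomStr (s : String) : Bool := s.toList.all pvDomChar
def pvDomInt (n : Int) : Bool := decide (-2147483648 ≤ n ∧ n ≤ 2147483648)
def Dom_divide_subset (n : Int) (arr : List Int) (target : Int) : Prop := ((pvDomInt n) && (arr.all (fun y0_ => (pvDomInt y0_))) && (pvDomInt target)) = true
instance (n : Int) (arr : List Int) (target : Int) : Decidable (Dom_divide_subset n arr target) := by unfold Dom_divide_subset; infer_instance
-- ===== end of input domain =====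

-- B replaces A's enumeration of itertools.combinations (re-summing every subset from scratch)
-- with an incremental doubling of each half's list of subset sums (alternative algorithm,
-- avoids re-summing each subset; measured ~1.5x at the sizes both finish).

-- ===== PORT A =====
-- retorna_conjuntos: chain.from_iterable(combinations(lista, r) for r in range(len(lista)+1))
def pvRetornaConjuntos (lista : List Int) : List (List Int) :=
  (List.range (lista.length + 1)).flatMap (fun r => PySem.List.combinations lista r)

def divide_subset (n : Int) (arr : List Int) (target : Int) : Int :=
  let size : Int := (arr.length : Int)
  let mid := PySem.Int.floordiv size 2
  let div1 := PySem.List.slice arr none (some mid)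
  let div2 := PySem.List.slice arr (some mid) none
  let div1_conjunto := pvRetornaConjuntos div1
  let div2_conjunto := pvRetornaConjuntos div2
  let mapa_somas : PySem.Dict Int Int :=
    div1_conjunto.foldl (fun d conjunto =>
      let soma := conjunto.foldl (fun s numero => s + numero) 0
      if d.contains soma = false then d.insert soma 1
      else d.insert soma (d.getD soma 0 + 1)) PySem.Dict.empty
  div2_conjunto.foldl (fun total conjunto =>
    let soma := conjunto.foldl (fun s numero => s + numero) 0
    let complemento := target - soma
    if mapa_somas.contains complemento then total + mapa_somas.getD complemento 0
    else total) 0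

-- ===== PORT B =====
-- subset_sums: sums = [0]; for x in lst: sums += [s + x for s in sums]
def pvSubsetSums (lst : List Int) : List Int :=
  lst.foldl (fun sums x => sums ++ sums.map (fun s => s + x)) [0]

def divide_subset_alt (n : Int) (arr : List Int) (target : Int) : Int :=
  let mid := PySem.Int.floordiv (arr.length : Int) 2
  let left := PySem.List.slice arr none (some mid)
  let right := PySem.List.slice arr (some mid) none
  let counts : PySem.Dict Int Int :=
    (pvSubsetSums left).foldl (fun d s => d.insert s (d.getD s 0 + 1)) PySem.Dict.empty
  ((pvSubsetSums right).map (fun s => counts.getD (target - s) 0)).sum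

-- ===== PRECONDITION & SPEC =====
def Spec_divide_subset (n : Int) (arr : List Int) (target : Int) (out : Int) : Prop := out = divide_subset_alt n arr target
instance (n : Int) (arr : List Int) (target : Int) (out : Int) : Decidable (Spec_divide_subset n arr target out) := by unfold Spec_divide_subset; infer_instance

-- ===== CLAIM (what is proved, stated in full; the proofs are below) =====
def Claim_equal_divide_subset : Prop := ∀ (n : Int) (arr : List Int) (target : Int), Dom_divide_subset n arr target → Spec_divide_subset n arr target (divide_subset n arr target)

-- ===== LEMMAS AND PROOFS =====

-- A's enumeration starts with the empty combination; peel it off.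
theorem pvRC_decomp (ys : List Int) : pvRetornaConjuntos ys
    = [[]] ++ (List.range ys.length).flatMap (fun r => PySem.List.combinations ys (r + 1)) := by
  unfold pvRetornaConjuntos
  rw [List.range_succ_eq_map, List.flatMap_cons, List.flatMap_map]
  simp [PySem.List.combinations_zero, Nat.succ_eq_add_one]

-- A's enumeration of x :: xs is, up to permutation, that of xs plus x consed onto each member.
theorem pvRC_cons (x : Int) (xs : List Int) :
    (pvRetornaConjuntos (x :: xs)).Perm
      (pvRetornaConjuntos xs ++ (pvRetornaConjuntos xs).map (x :: ·)) := by
  have htail : (List.range (xs.length + 1)).flatMap (fun r => PySem.List.combinations xs (r + 1))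
      = (List.range xs.length).flatMap (fun r => PySem.List.combinations xs (r + 1)) := by
    rw [List.range_succ, List.flatMap_append, List.flatMap_singleton,
      PySem.List.combinations_eq_nil_of_length_lt xs (Nat.lt_succ_self _), List.append_nil]
  rw [pvRC_decomp (x :: xs)]
  simp only [List.length_cons, PySem.List.combinations_cons_succ]
  refine List.Perm.trans (List.Perm.append_left [[]] (List.flatMap_append_perm _ _ _).symm) ?_
  rw [← List.map_flatMap, htail,
    show List.flatMap (PySem.List.combinations xs) (List.range (xs.length + 1))
      = pvRetornaConjuntos xs from rfl, pvRC_decomp xs]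
  refine List.Perm.trans (List.Perm.append_left _ List.perm_append_comm) ?_
  rw [← List.append_assoc]

-- invariant of B's doubling loop, generalized over the accumulator
theorem pvSums_go (xs : List Int) : ∀ acc : List Int,
    (xs.foldl (fun sums x => sums ++ sums.map (fun s => s + x)) acc).Perm
      (acc.flatMap (fun a => ((pvRetornaConjuntos xs).map List.sum).map (a + ·))) := by
  induction xs with
  | nil =>
    intro acc
    simp [pvRetornaConjuntos, PySem.List.combinations_zero]
  | cons x xs ih =>
    intro acc
    rw [List.foldl_cons]
    refine (ih _).trans ?_
    rw [List.flatMap_append, List.flatMap_map]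
    have hS : (((pvRetornaConjuntos (x :: xs)).map List.sum)).Perm
        (((pvRetornaConjuntos xs).map List.sum) ++ ((pvRetornaConjuntos xs).map List.sum).map (x + ·)) := by
      refine ((pvRC_cons x xs).map List.sum).trans (List.Perm.of_eq ?_)
      rw [List.map_append, List.map_map, List.map_map]
      refine congrArg _ ?_
      exact List.map_congr_left (fun c _ => by simp [Function.comp])
    refine List.Perm.trans (List.flatMap_append_perm acc _ _) ?_
    refine List.Perm.flatMap_left acc fun a _ => ?_
    refine List.Perm.trans ?_ ((hS.map (a + ·)).symm)
    rw [List.map_append]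
    refine List.Perm.append_left _ (List.Perm.of_eq ?_)
    simp only [List.map_map]
    exact List.map_congr_left (fun s _ => by simp [Function.comp, add_assoc])

-- the multiset of sums A enumerates is exactly the one B's doubling loop builds
theorem pvSums_perm (xs : List Int) :
    ((pvRetornaConjuntos xs).map List.sum).Perm (pvSubsetSums xs) := by
  refine List.Perm.symm ((pvSums_go xs [0]).trans (List.Perm.of_eq ?_))
  simp

theorem pv_main (n : Int) (arr : List Int) (target : Int) :
    divide_subset n arr target = divide_subset_alt n arr target := by
  unfold divide_subset divide_subset_alt
  simp only []
  set mid := PySem.Int.floordiv ((arr.length : Int)) 2 with hmid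
  set left := PySem.List.slice arr none (some mid) with hleft
  set right := PySem.List.slice arr (some mid) none with hright
  -- A's dict loop is the counter of the combination sums
  have hmapa : (pvRetornaConjuntos left).foldl (fun d conjunto =>
      let soma := conjunto.foldl (fun s numero => s + numero) 0
      if d.contains soma = false then d.insert soma 1
      else d.insert soma (d.getD soma 0 + 1)) PySem.Dict.empty
      = PySem.Dict.counter ((pvRetornaConjuntos left).map List.sum) := by
    rw [PySem.List.foldl_congr_mem _ _
        (fun d conjunto => d.insert conjunto.sum (d.getD conjunto.sum 0 + 1)) _ ?_]
    · rw [← List.foldl_map (f := List.sum) (g := fun (d : PySem.Dict Int Int) s => d.insert s (d.getD s 0 + 1)), PySem.Dict.foldl_insert_getD_add_one_eq_counter]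
    · intro d c _
      simp only [← List.sum_eq_foldl]
      by_cases hc : d.contains c.sum
      · simp [hc]
      · simp only [Bool.not_eq_true] at hc
        simp [hc, PySem.Dict.getD_of_not_contains d 0 hc]
  rw [hmapa, PySem.Dict.foldl_insert_getD_add_one_eq_counter]
  rw [PySem.List.foldl_congr_mem _ _
      (fun (total : Int) (c : List Int) =>
        total + (PySem.Dict.counter ((pvRetornaConjuntos left).map List.sum)).getD (target - c.sum) 0) _ ?_]
  · rw [← List.foldl_map (f := List.sum)
      (g := fun (t : Int) s => t + (PySem.Dict.counter ((pvRetornaConjuntos left).map List.sum)).getD (target - s) 0),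
      PySem.List.foldl_add, zero_add]
    have hf : (fun s => (PySem.Dict.counter ((pvRetornaConjuntos left).map List.sum)).getD (target - s) 0)
        = (fun s => (PySem.Dict.counter (pvSubsetSums left)).getD (target - s) 0) := by
      funext s
      rw [PySem.Dict.getD_counter, PySem.Dict.getD_counter, (pvSums_perm left).count_eq]
    rw [hf]
    exact ((pvSums_perm right).map _).sum_eq
  · intro t c _
    simp only [← List.sum_eq_foldl]
    by_cases hc : (PySem.Dict.counter ((pvRetornaConjuntos left).map List.sum)).contains (target - c.sum)
    · simp [hc]
    · simp only [Bool.not_eq_true] at hc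
      simp [hc, PySem.Dict.getD_of_not_contains _ 0 hc]

-- ===== VERDICT (by name: the statement is the Claim_ definition above) =====
theorem divide_subset_spec : Claim_equal_divide_subset := by
  unfold Claim_equal_divide_subset Spec_divide_subset
  intro n arr target _
  exact pv_main n arr target
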